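-- pv_equiv track=rewrite | github.com/Kitakyushulassavirus728/ResearcherSkill | tests/discipline/verify.py | longest_discard_streak
-- ===== SOURCE A (Python) =====
-- def longest_discard_streak(rows):
--     """Find longest consecutive discard streak (excluding baseline)."""
--     max_streak = 0
--     current = 0
--     for r in rows:
--         if r["status"] == "discard":
--             current += 1
--             max_streak = max(max_streak, current)
--         elif r["status"] in ("keep", "keep*"):
--             current = 0
--     return max_streak
-- ===== SOURCE B (Python) =====
-- def longest_discard_streak(rows):
--     """Longest discard streak = largest gap between consecutive keep/keep* positions.
--
--     Stage 1 projects the rows to booleans (True = discard), dropping statuses that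
--     are neither discard nor keep/keep* (they affect nothing). Stage 2 lists the
--     positions of the keeps, brackets them with -1 and len(marks), and returns the
--     maximum distance between adjacent reset positions minus one: between two
--     consecutive resets every mark is a discard, so that distance-minus-one is
--     exactly the discard streak of that segment."""
--     marks = [r["status"] == "discard" for r in rows
--              if r["status"] in ("discard", "keep", "keep*")]
--     resets = [-1] + [i for i, m in enumerate(marks) if not m] + [len(marks)]
--     return max(b - a - 1 for a, b in zip(resets, resets[1:]))
-- ===== Notes on version B (the rewrite author's own statement) =====
-- stated objective: alternative
-- what changed: B replaces A's running max/current-streak loop by a different algorithm: project the rows to discard/keep booleans, list the positions of the keep/keep* resets bracketed by -1 and len, and return the maximum gap between consecutive reset positions minus one.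
import Mathlib
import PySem

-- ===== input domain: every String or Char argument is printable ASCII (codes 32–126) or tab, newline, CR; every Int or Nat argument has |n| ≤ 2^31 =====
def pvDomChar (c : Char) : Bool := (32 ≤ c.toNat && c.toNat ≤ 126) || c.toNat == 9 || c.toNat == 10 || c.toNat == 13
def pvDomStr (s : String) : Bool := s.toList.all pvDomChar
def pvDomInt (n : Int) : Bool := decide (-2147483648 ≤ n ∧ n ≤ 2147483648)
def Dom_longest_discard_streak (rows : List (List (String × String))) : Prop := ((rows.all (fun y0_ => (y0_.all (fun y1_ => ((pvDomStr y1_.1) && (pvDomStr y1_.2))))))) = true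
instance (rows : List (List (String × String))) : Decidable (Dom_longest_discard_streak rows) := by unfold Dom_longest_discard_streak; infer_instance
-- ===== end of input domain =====

-- B replaces A's running max/current loop by a different algorithm: project the rows to
-- discard/keep booleans, list the positions of the keep-resets, and return the largest
-- gap between consecutive reset positions minus one; same return value wherever A returns.

-- ===== PORT A =====
-- r["status"] = first-match association-list lookup (KeyError, i.e. none, excluded by Pre_; the fold skips that row unchanged).
def stepA (s : Int × Int) (r : List (String × String)) : Int × Int :=
  match r.lookup "status" with
  | some v =>
      if v == "discard" then (max s.1 (s.2 + 1), s.2 + 1)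
      else if v == "keep" || v == "keep*" then (s.1, 0)
      else s
  | none => s

def longest_discard_streak (rows : List (List (String × String))) : Int :=
  (rows.foldl stepA (0, 0)).1

-- ===== PORT B =====
-- the comprehension's filter ('status' in the triple) and its value ('status' == "discard")
def markB (r : List (String × String)) : Option Bool :=
  match r.lookup "status" with
  | some v =>
      if v == "discard" || v == "keep" || v == "keep*" then some (v == "discard") else none
  | none => none

def longest_discard_streak_alt (rows : List (List (String × String))) : Int :=
  let marks := rows.filterMap markB
  let resets := [(-1 : Int)] ++
    ((PySem.List.enumerate marks).filterMap (fun p => if p.2 then none else some p.1)) ++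
    [(marks.length : Int)]
  -- max(b - a - 1 for a, b in zip(resets, resets[1:])); the list is nonempty, getD never fires
  (PySem.List.max? ((resets.zip resets.tail).map (fun p => p.2 - p.1 - 1)) (fun y => y)).getD 0

-- ===== PRECONDITION & SPEC =====
-- Pre_ excludes exactly the inputs on which Python A raises KeyError: a row without a "status" key.
def Pre_longest_discard_streak (rows : List (List (String × String))) : Prop :=
  ∀ r ∈ rows, "status" ∈ r.map Prod.fst
instance (rows : List (List (String × String))) : Decidable (Pre_longest_discard_streak rows) := by
  unfold Pre_longest_discard_streak; infer_instance

def pvWitness_longest_discard_streak : (List (List (String × String))) :=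
  [[("status", "discard")], [("status", "keep")]]

def Spec_longest_discard_streak (rows : List (List (String × String))) (out : Int) : Prop := out = longest_discard_streak_alt rows
instance (rows : List (List (String × String))) (out : Int) : Decidable (Spec_longest_discard_streak rows out) := by unfold Spec_longest_discard_streak; infer_instance

-- ===== CLAIM (what is proved, stated in full; the proofs are below) =====
def Claim_equal_longest_discard_streak : Prop := ∀ (rows : List (List (String × String))), Dom_longest_discard_streak rows → Pre_longest_discard_streak rows → Spec_longest_discard_streak rows (longest_discard_streak rows)

-- ===== LEMMAS AND PROOFS =====

-- A's loop, factored through the discard/keep booleans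
def stepM (s : Int × Int) : Bool → Int × Int
  | true => (max s.1 (s.2 + 1), s.2 + 1)
  | false => (s.1, 0)

-- maximum discard-segment count of ms when the open segment already holds c discards
def mseg (c : Int) : List Bool → Int
  | [] => c
  | true :: ms => mseg (c + 1) ms
  | false :: ms => max c (mseg 0 ms)

-- (leading segment count, remaining segment counts) of a boolean mark list
def segHT : List Bool → Int × List Int
  | [] => (0, [])
  | true :: ms => ((segHT ms).1 + 1, (segHT ms).2)
  | false :: ms => (0, (segHT ms).1 :: (segHT ms).2)

-- positions of the keep-resets, counting from s
def Epos (ms : List Bool) (s : Int) : List Int :=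
  (PySem.List.enumerate ms s).filterMap (fun p => if p.2 then none else some p.1)

-- the gaps B takes the max of
def pairsG (xs : List Int) : List Int :=
  (xs.zip xs.tail).map (fun p => p.2 - p.1 - 1)

theorem foldl_max_init (l : List Int) : ∀ a b : Int, l.foldl max (max a b) = max (l.foldl max a) b := by
  induction l with
  | nil => intro a b; simp
  | cons h t ih =>
      intro a b
      simp only [List.foldl_cons]
      rw [show max (max a b) h = max (max a h) b by omega, ih]

theorem mseg_ge (ms : List Bool) : ∀ c, c ≤ mseg c ms := by
  induction ms with
  | nil => intro c; simp [mseg]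
  | cons b t ih =>
      intro c
      cases b with
      | true => exact le_trans (by omega) (ih (c + 1))
      | false => simp [mseg]

-- A's fold over rows is A's fold over the boolean marks (Pre_: every row has a "status")
theorem lookup_status_some (r : List (String × String))
    (h : "status" ∈ r.map Prod.fst) : ∃ v, r.lookup "status" = some v := by
  induction r with
  | nil => simp at h
  | cons p t ih =>
      by_cases hp : "status" = p.1
      · exact ⟨p.2, by simp [List.lookup, hp]⟩
      · have hb : ("status" == p.1) = false := beq_eq_false_iff_ne.mpr hp
        have hm : "status" ∈ t.map Prod.fst := by
          simp only [List.map_cons, List.mem_cons] at h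
          exact h.resolve_left hp
        obtain ⟨v, hv⟩ := ih hm
        exact ⟨v, by simp [List.lookup, hb, hv]⟩

-- A's fold over rows is A's fold over the boolean marks (Pre_: every row has a "status")
theorem foldA_factor (rows : List (List (String × String)))
    (h : ∀ r ∈ rows, "status" ∈ r.map Prod.fst) :
    ∀ s, rows.foldl stepA s = (rows.filterMap markB).foldl stepM s := by
  induction rows with
  | nil => intro s; rfl
  | cons r t ih =>
      intro s
      have ht : ∀ r' ∈ t, "status" ∈ r'.map Prod.fst := fun r' hm => h r' (List.mem_cons_of_mem _ hm)
      obtain ⟨v, hv⟩ := lookup_status_some r (h r (List.mem_cons_self ..))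
      simp only [List.foldl_cons, List.filterMap_cons, stepA, markB, hv]
      by_cases hd : v = "discard"
      · simp only [hd, beq_self_eq_true, Bool.true_or, if_true, List.foldl_cons, stepM]
        exact ih ht _
      · have hd' : (v == "discard") = false := beq_eq_false_iff_ne.mpr hd
        by_cases hk : v = "keep"
        · simp only [hk, beq_self_eq_true, Bool.true_or, if_true]
          exact ih ht _
        · have hk' : (v == "keep") = false := beq_eq_false_iff_ne.mpr hk
          by_cases hk2 : v = "keep*"
          · simp only [hk2, beq_self_eq_true, Bool.or_true, if_true, List.foldl_cons, stepM]
            exact ih ht _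
          · have hk2' : (v == "keep*") = false := beq_eq_false_iff_ne.mpr hk2
            simp only [hd', hk', hk2', Bool.or_false, if_false, Bool.false_eq_true]
            exact ih ht _

-- A's running max equals max m (mseg c ms) under the loop's own invariant 0 ≤ c ≤ m
theorem foldM_eq_mseg (ms : List Bool) : ∀ m c, 0 ≤ c → c ≤ m →
    (ms.foldl stepM (m, c)).1 = max m (mseg c ms) := by
  induction ms with
  | nil => intro m c h0 hc; simp [mseg]; omega
  | cons b t ih =>
      intro m c h0 hc
      cases b with
      | true =>
          rw [List.foldl_cons]
          show (t.foldl stepM (max m (c + 1), c + 1)).1 = max m (mseg (c + 1) t)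
          rw [ih _ _ (by omega) (le_max_right m (c + 1))]
          have := mseg_ge t (c + 1)
          omega
      | false =>
          rw [List.foldl_cons]
          show (t.foldl stepM (m, 0)).1 = max m (max c (mseg 0 t))
          rw [ih m 0 le_rfl (by omega)]
          omega

-- head-shift of the gap list
theorem pairsG_cons (s : Int) (l : List Int) (hl : l ≠ []) :
    pairsG (s :: l) = (l.headI - s - 1) :: pairsG l := by
  cases l with
  | nil => exact absurd rfl hl
  | cons x xs => simp [pairsG]

-- the gaps between the bracketed reset positions are exactly the segment counts
theorem gaps_eq_segs (ms : List Bool) : ∀ s : Int,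
    pairsG (s :: (Epos ms (s + 1) ++ [s + 1 + (ms.length : Int)])) =
      (segHT ms).1 :: (segHT ms).2 := by
  induction ms with
  | nil =>
      intro s
      simp [Epos, pairsG, segHT]
  | cons b t ih =>
      intro s
      have iht := ih (s + 1)
      have hne : Epos t (s + 1 + 1) ++ [s + 1 + 1 + (t.length : Int)] ≠ [] := by simp
      rw [pairsG_cons _ _ hne] at iht
      cases b with
      | true =>
          have hE : Epos (true :: t) (s + 1) = Epos t (s + 1 + 1) := by
            simp [Epos]
          have hlen : s + 1 + ((true :: t).length : Int) = s + 1 + 1 + (t.length : Int) := by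
            rw [List.length_cons]; push_cast; ring
          rw [hE, hlen, pairsG_cons _ _ hne]
          injection iht with ih1 ih2
          rw [ih2]
          show _ :: (segHT t).2 = ((segHT t).1 + 1) :: (segHT t).2
          congr 1
          omega
      | false =>
          have hE : Epos (false :: t) (s + 1) = (s + 1) :: Epos t (s + 1 + 1) := by
            simp [Epos]
          have hlen : s + 1 + ((false :: t).length : Int) = s + 1 + 1 + (t.length : Int) := by
            rw [List.length_cons]; push_cast; ring
          rw [hE, hlen, List.cons_append,
            pairsG_cons s ((s + 1) :: (Epos t (s + 1 + 1) ++ [s + 1 + 1 + (t.length : Int)])) (by simp),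
            pairsG_cons _ _ hne, iht]
          show _ :: (segHT t).1 :: (segHT t).2 = (0 : Int) :: (segHT t).1 :: (segHT t).2
          simp only [List.headI]
          rw [show s + 1 - s - 1 = (0 : Int) by ring]

-- mseg is the running max over the segment counts
theorem mseg_eq_foldl (ms : List Bool) : ∀ c : Int,
    mseg c ms = (segHT ms).2.foldl max (c + (segHT ms).1) := by
  induction ms with
  | nil => intro c; simp [mseg, segHT]
  | cons b t ih =>
      intro c
      cases b with
      | true =>
          show mseg (c + 1) t = (segHT t).2.foldl max (c + ((segHT t).1 + 1))
          rw [ih (c + 1)]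
          congr 1
          ring
      | false =>
          show max c (mseg 0 t) = ((segHT t).1 :: (segHT t).2).foldl max (c + 0)
          rw [List.foldl_cons, ih 0, zero_add, add_zero,
            show max c (segHT t).1 = max (segHT t).1 c from max_comm .., foldl_max_init]
          omega

-- ===== VERDICT (by name: the statement is the Claim_ definition above) =====
theorem longest_discard_streak_spec : Claim_equal_longest_discard_streak := by
  intro rows _ hpre
  unfold Spec_longest_discard_streak longest_discard_streak longest_discard_streak_alt
  rw [foldA_factor rows hpre, foldM_eq_mseg _ 0 0 le_rfl le_rfl]
  have hg := gaps_eq_segs (rows.filterMap markB) (-1)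
  rw [show (-1 : Int) + 1 = 0 by ring, zero_add] at hg
  show max 0 (mseg 0 (rows.filterMap markB)) =
    (PySem.List.max? (pairsG ((-1) :: (Epos (rows.filterMap markB) 0 ++
      [((rows.filterMap markB).length : Int)]))) (fun y => y)).getD 0
  rw [hg, PySem.List.max?_id_cons, Option.getD_some, mseg_eq_foldl, zero_add]
  have h0 := mseg_ge (rows.filterMap markB) 0
  rw [mseg_eq_foldl, zero_add] at h0
  omega
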